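-- pv_equiv track=rewrite | github.com/cohmoti/pyattck | pyattck/enterprise/attckobject.py | _create_data_sources_dict
-- ===== SOURCE A (Python) =====
-- def _create_data_sources_dict(obj):
--     return_dict = {}
--     if isinstance(obj, list):
--         for item in obj:
--             if ':' in item:
--                 data_source, data_component = item.split(':')
--                 if data_source not in return_dict:
--                     return_dict[data_source] = []
--                 return_dict[data_source].append(data_component.strip())
--     return return_dict
-- ===== SOURCE B (Python) =====
-- def _create_data_sources_dict(obj):
--     if not isinstance(obj, list):
--         return {}
--     pairs = [(data_source, data_component.strip())
--              for data_source, data_component in (item.split(':') for item in obj if ':' in item)]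
--     sources = dict.fromkeys(source for source, _ in pairs)
--     return {source: [c for s, c in pairs if s == source] for source in sources}
-- ===== Notes on version B (the rewrite author's own statement) =====
-- stated objective: alternative
-- what changed: A grows a dict incrementally, appending to a per-key list inside one loop; B first extracts the (source, stripped component) pairs with a comprehension, deduplicates the sources in first-occurrence order, and builds the result dict per key by filtering the pair list.
import Mathlib
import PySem

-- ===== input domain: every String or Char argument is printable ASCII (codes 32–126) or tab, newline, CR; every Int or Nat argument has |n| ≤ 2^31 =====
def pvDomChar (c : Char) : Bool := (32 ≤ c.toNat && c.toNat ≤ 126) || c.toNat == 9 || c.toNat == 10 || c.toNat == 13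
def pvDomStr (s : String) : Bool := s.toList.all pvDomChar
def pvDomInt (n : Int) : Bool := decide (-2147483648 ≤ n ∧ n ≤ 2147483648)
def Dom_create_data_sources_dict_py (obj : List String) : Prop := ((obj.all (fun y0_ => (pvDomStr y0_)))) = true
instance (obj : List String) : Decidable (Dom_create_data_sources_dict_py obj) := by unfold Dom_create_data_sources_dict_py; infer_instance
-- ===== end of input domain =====

-- B replaces A's incremental dict/append loop by: extract (source, stripped component) pairs,
-- dedup sources in first-occurrence order, then build each entry by filtering the pair list (objective: alternative decomposition).

-- ===== PORT A =====
-- one loop; dict of lists grown in place (return_dict[ds] = [] if absent, then append)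
def create_data_sources_dict_py (obj : List String) : List (String × List String) :=
  (obj.foldl (fun return_dict item =>
      if PySem.Str.isIn ":" item then
        match PySem.Str.split? item ":" with
        | some [data_source, data_component] =>
            let d := if return_dict.contains data_source then return_dict
                     else return_dict.insert data_source []
            d.modify data_source [] (fun l => l ++ [PySem.Str.strip data_component])
        | _ => return_dict   -- unreachable under Pre_: Python raises ValueError (unpacking) here
      else return_dict)
    PySem.Dict.empty).items

-- ===== PORT B =====
def create_data_sources_dict_py_alt (obj : List String) : List (String × List String) :=
  let pairs := obj.filterMap (fun item =>
      if PySem.Str.isIn ":" item then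
        (PySem.Str.split? item ":").bind (fun parts =>
          -- two-name unpacking: exactly two parts, else Python raises ValueError (unreachable under Pre_)
          if hp : parts.length = 2 then
            some (parts[0], PySem.Str.strip parts[1])
          else none)
      else none)
  let sources := PySem.List.dedup (pairs.map (fun p => p.1))
  sources.map (fun source => (source, (pairs.filter (fun p => p.1 == source)).map (fun p => p.2)))

-- ===== PRECONDITION & SPEC =====
-- Pre_ excludes inputs containing an item with two or more ':' — there item.split(':') yields
-- more than two parts and A's two-name unpacking raises ValueError (B raises the same way).
def Pre_create_data_sources_dict_py (obj : List String) : Prop :=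
  ∀ item ∈ obj, PySem.Str.isIn ":" item = true → ((PySem.Str.split? item ":").getD []).length = 2
instance (obj : List String) : Decidable (Pre_create_data_sources_dict_py obj) := by unfold Pre_create_data_sources_dict_py; infer_instance

def pvWitness_create_data_sources_dict_py : List String := ["net:flow ", "host: log", "plain", "net:pcap"]

def Spec_create_data_sources_dict_py (obj : List String) (out : List (String × List String)) : Prop := out = create_data_sources_dict_py_alt obj
instance (obj : List String) (out : List (String × List String)) : Decidable (Spec_create_data_sources_dict_py obj out) := by unfold Spec_create_data_sources_dict_py; infer_instance

-- ===== CLAIM (what is proved, stated in full; the proofs are below) =====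
def Claim_equal_create_data_sources_dict_py : Prop := ∀ (obj : List String), Dom_create_data_sources_dict_py obj → Pre_create_data_sources_dict_py obj → Spec_create_data_sources_dict_py obj (create_data_sources_dict_py obj)

-- ===== LEMMAS AND PROOFS =====

-- the pair a well-formed item contributes (proof-side helper; B's filterMap function)
def pvParse (item : String) : Option (String × String) :=
  if PySem.Str.isIn ":" item then
    (PySem.Str.split? item ":").bind (fun parts =>
      if hp : parts.length = 2 then
        some (parts[0], PySem.Str.strip parts[1])
      else none)
  else none

-- on a well-formed item, A's loop body is a single dict-of-lists modify on the parsed pair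
theorem pvStepA_eq (d : PySem.Dict String (List String)) (item : String)
    (h : PySem.Str.isIn ":" item = true → ((PySem.Str.split? item ":").getD []).length = 2) :
    (if PySem.Str.isIn ":" item then
        match PySem.Str.split? item ":" with
        | some [data_source, data_component] =>
            let d' := if d.contains data_source then d
                     else d.insert data_source []
            d'.modify data_source [] (fun l => l ++ [PySem.Str.strip data_component])
        | _ => d
      else d)
    = (match pvParse item with
       | some p => d.modify p.1 [] (fun l => l ++ [p.2])
       | none => d) := by
  unfold pvParse
  by_cases hin : PySem.Str.isIn ":" item = true
  · simp only [hin, if_true]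
    have hlen := h hin
    cases hsp : PySem.Str.split? item ":" with
    | none => simp [hsp] at hlen ⊢
    | some parts =>
      rw [hsp] at hlen
      match parts, hlen with
      | [a, b], _ =>
        simp only [Option.bind_some, List.length_cons, List.length_nil,
          reduceDIte, List.getElem_cons_zero, List.getElem_cons_succ]
        by_cases hc : d.contains a = true
        · simp [hc]
        · have hg : d.getD a [] = [] :=
            PySem.Dict.getD_of_not_contains d [] (by simpa using hc)
          simp only [hc, if_false, Bool.false_eq_true,
            PySem.Dict.modify, PySem.Dict.getD_insert_self,
            PySem.Dict.insert_insert_self, hg]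
  · rw [if_neg hin, if_neg hin]

-- A's per-item fold, restated as the grouping fold over the parsed-pair list
theorem pvFoldl_parse (obj : List String) :
    (List.foldl (fun (d : PySem.Dict String (List String)) it => match pvParse it with
      | some p => d.modify p.1 [] (fun l => l ++ [p.2])
      | none => d) PySem.Dict.empty obj)
    = List.foldl (fun d p => d.modify p.1 [] (fun l => l ++ [p.2])) PySem.Dict.empty
        (obj.filterMap pvParse) := by
  rw [List.foldl_filterMap]
  exact PySem.List.foldl_congr_mem obj _ _ _ (fun acc x _ => by cases pvParse x <;> rfl)

-- ===== VERDICT (by name: the statement is the Claim_ definition above) =====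
theorem create_data_sources_dict_py_spec : Claim_equal_create_data_sources_dict_py := by
  intro obj _ hpre
  unfold Spec_create_data_sources_dict_py
  unfold create_data_sources_dict_py create_data_sources_dict_py_alt
  -- A's loop over obj is the grouping fold over the parsed pairs
  rw [PySem.List.foldl_congr_mem _ _
        (fun d it => match pvParse it with
          | some p => d.modify p.1 [] (fun l => l ++ [p.2])
          | none => d) _
        (fun d it hit => pvStepA_eq d it (hpre it hit))]
  rw [pvFoldl_parse obj]
  have hpairs : obj.filterMap (fun item =>
      if PySem.Str.isIn ":" item then
        (PySem.Str.split? item ":").bind (fun parts =>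
          if hp : parts.length = 2 then
            some (parts[0], PySem.Str.strip parts[1])
          else none)
      else none) = obj.filterMap pvParse := rfl
  rw [hpairs]
  set pairs := obj.filterMap pvParse with hp
  set D := pairs.foldl (fun d p => d.modify p.1 [] (fun l => l ++ [p.2])) PySem.Dict.empty with hD
  have hnd : D.keys.Nodup := by
    rw [hD]
    exact PySem.Dict.nodup_keys_foldl_modify_key pairs Prod.fst []
      (fun _ p => fun l => l ++ [p.2]) PySem.Dict.empty (by simp)
  rw [PySem.Dict.items_eq_map_keys D hnd []]
  have hkeys : D.keys = PySem.Set.ofList (pairs.map (fun p => p.1)) := by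
    rw [hD]
    rw [PySem.Dict.keys_foldl_modify_key pairs Prod.fst []
      (fun _ p => fun l => l ++ [p.2]) PySem.Dict.empty]
    rfl
  rw [hkeys]
  show _ = (PySem.List.dedup (pairs.map (fun p => p.1))).map
      (fun source => (source, (pairs.filter (fun p => p.1 == source)).map (fun p => p.2)))
  rw [PySem.List.dedup_eq_ofList]
  apply List.map_congr_left
  intro k _
  rw [hD, PySem.Dict.getD_foldl_modify_append pairs PySem.Dict.empty k]
  simp [PySem.Dict.getD_empty]
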